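-- pv_equiv track=rewrite | github.com/ColtonShawProctor/IBM-Workshop | backend/tests/test_bid_quality.py | _longest_off_block
-- ===== SOURCE A (Python) =====
-- def _longest_off_block(working_days: set[int], total_dates: int) -> int:
--     """Longest contiguous run of non-working days."""
--     current = 0
--     best = 0
--     for d in range(1, total_dates + 1):
--         if d not in working_days:
--             current += 1
--             best = max(best, current)
--         else:
--             current = 0
--     return best
-- ===== SOURCE B (Python) =====
-- def _longest_off_block(working_days: set[int], total_dates: int) -> int:
--     """Longest contiguous run of non-working days ."""
--     ws = sorted({w for w in working_days if 1 <= w <= total_dates})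
--     if not ws:
--         return max(total_dates, 0)
--     best = ws[0] - 1
--     prev = ws[0]
--     for w in ws[1:]:
--         best = max(best, w - prev - 1)
--         prev = w
--     return max(best, total_dates - prev)
-- ===== Notes on version B (the rewrite author's own statement) =====
-- stated objective: alternative
-- what changed: Replaced the per-date scan over range(1, total_dates+1) with a gap computation over the sorted in-range working days: the answer is the maximum of the block before the first working day, the interior gaps, and the block after the last.
import Mathlib
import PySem

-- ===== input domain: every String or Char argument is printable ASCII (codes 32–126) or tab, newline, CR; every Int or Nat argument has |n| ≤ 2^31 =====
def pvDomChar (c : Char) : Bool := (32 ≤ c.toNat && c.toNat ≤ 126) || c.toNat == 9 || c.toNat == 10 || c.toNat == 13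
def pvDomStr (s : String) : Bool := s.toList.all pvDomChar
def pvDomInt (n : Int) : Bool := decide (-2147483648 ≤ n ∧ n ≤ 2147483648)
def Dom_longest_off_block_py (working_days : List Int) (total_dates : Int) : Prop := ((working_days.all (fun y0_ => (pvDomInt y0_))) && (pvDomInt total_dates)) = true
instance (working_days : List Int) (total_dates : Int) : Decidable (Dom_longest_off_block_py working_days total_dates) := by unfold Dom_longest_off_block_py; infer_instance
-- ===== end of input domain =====

-- B replaces A's per-date scan with a gap computation over the sorted in-range working days (alternative algorithm, same result).

-- ===== PORT A =====
def longest_off_block_py (working_days : List Int) (total_dates : Int) : Int :=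
  -- current = 0; best = 0; for d in range(1, total_dates+1): …; return best
  ((PySem.List.pyRange 1 (total_dates + 1) 1).foldl
    (fun (s : Int × Int) d =>
      if ¬ working_days.contains d then (s.1 + 1, max s.2 (s.1 + 1))
      else (0, s.2))
    (0, 0)).2

-- ===== PORT B =====
-- the loop 'for w in ws[1:]: best = max(best, w - prev - 1); prev = w' on state (best, prev)
def lobLoop (bp : Int × Int) : List Int → Int × Int
  | [] => bp
  | w :: rest => lobLoop (max bp.1 (w - bp.2 - 1), w) rest

def longest_off_block_py_alt (working_days : List Int) (total_dates : Int) : Int :=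
  -- ws = sorted({w for w in working_days if 1 <= w <= total_dates})
  match PySem.List.sorted (PySem.Set.ofList (working_days.filter (fun w => 1 ≤ w && w ≤ total_dates))) (fun x => x) false with
  | [] => max total_dates 0
  | w0 :: rest =>
      let bp := lobLoop (w0 - 1, w0) rest
      max bp.1 (total_dates - bp.2)

-- ===== PRECONDITION & SPEC =====
def Spec_longest_off_block_py (working_days : List Int) (total_dates : Int) (out : Int) : Prop := out = longest_off_block_py_alt working_days total_dates
instance (working_days : List Int) (total_dates : Int) (out : Int) : Decidable (Spec_longest_off_block_py working_days total_dates out) := by unfold Spec_longest_off_block_py; infer_instance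

-- ===== CLAIM (what is proved, stated in full; the proofs are below) =====
def Claim_equal_longest_off_block_py : Prop := ∀ (working_days : List Int) (total_dates : Int), Dom_longest_off_block_py working_days total_dates → Spec_longest_off_block_py working_days total_dates (longest_off_block_py working_days total_dates)

-- ===== LEMMAS AND PROOFS =====

-- the sorted list of in-range working days, as built by B
def lobS (ws : List Int) (t : Int) : List Int :=
  PySem.List.sorted (PySem.Set.ofList (ws.filter (fun w => 1 ≤ w && w ≤ t))) (fun x => x) false

lemma mem_lobS {ws : List Int} {t x : Int} (h : x ∈ lobS ws t) : x ∈ ws ∧ 1 ≤ x ∧ x ≤ t := by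
  unfold lobS at h
  rw [PySem.List.mem_sorted, PySem.Set.mem_ofList, List.mem_filter] at h
  refine ⟨h.1, ?_, ?_⟩ <;> · have h2 := h.2; simp at h2; omega

lemma lobLoop_append (bp : Int × Int) (l : List Int) (x : Int) :
    lobLoop bp (l ++ [x]) = (max (lobLoop bp l).1 (x - (lobLoop bp l).2 - 1), x) := by
  induction l generalizing bp with
  | nil => rfl
  | cons a l ih => simp [lobLoop, ih]

lemma lobLoop_fst_ge (bp : Int × Int) (l : List Int) : bp.1 ≤ (lobLoop bp l).1 := by
  induction l generalizing bp with
  | nil => simp [lobLoop]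
  | cons a l ih =>
      calc bp.1 ≤ max bp.1 (a - bp.2 - 1) := le_max_left _ _
        _ ≤ _ := ih _

lemma lobS_mem_iff (ws : List Int) (t x : Int) :
    x ∈ lobS ws t ↔ x ∈ ws ∧ 1 ≤ x ∧ x ≤ t := by
  constructor
  · exact mem_lobS
  · intro hx
    unfold lobS
    rw [PySem.List.mem_sorted, PySem.Set.mem_ofList, List.mem_filter]
    refine ⟨hx.1, ?_⟩
    simp only [Bool.and_eq_true, decide_eq_true_eq]
    omega

lemma lobS_pairwise_lt (ws : List Int) (t : Int) : (lobS ws t).Pairwise (· < ·) := by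
  unfold lobS
  exact PySem.List.sorted_ofList_pairwise_lt _

lemma lobS_succ_not_mem (ws : List Int) (n : Nat) (h : ((n : Int) + 1) ∉ ws) :
    lobS ws ((n : Int) + 1) = lobS ws (n : Int) := by
  unfold lobS
  congr 1
  congr 1
  apply List.filter_congr
  intro w hw
  have hne : w ≠ (n : Int) + 1 := fun he => h (he ▸ hw)
  congr 1
  rw [decide_eq_decide]
  omega

lemma lobS_succ_mem (ws : List Int) (n : Nat) (h : ((n : Int) + 1) ∈ ws) :
    lobS ws ((n : Int) + 1) = lobS ws (n : Int) ++ [(n : Int) + 1] := by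
  have hnd : (lobS ws (n : Int)).Nodup := by
    unfold lobS
    exact (PySem.List.sorted_perm _ _ _).nodup_iff.2 (PySem.Set.nodup_ofList _)
  have hnotin : ((n : Int) + 1) ∉ lobS ws (n : Int) := by
    intro hx
    have := mem_lobS hx
    omega
  apply PySem.List.sorted_eq_of_perm_of_pairwise_lt
  · -- perm: same membership, both nodup
    apply (List.perm_ext_iff_of_nodup ?_ ?_).2
    · intro a
      rw [List.mem_append, PySem.Set.mem_ofList, List.mem_filter, List.mem_singleton,
        lobS_mem_iff]
      constructor
      · rintro (⟨ha, h1, h2⟩ | rfl)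
        · exact ⟨ha, by simp only [Bool.and_eq_true, decide_eq_true_eq]; omega⟩
        · exact ⟨h, by simp only [Bool.and_eq_true, decide_eq_true_eq]; omega⟩
      · rintro ⟨ha, hb⟩
        simp only [Bool.and_eq_true, decide_eq_true_eq] at hb
        by_cases he : a = (n : Int) + 1
        · exact Or.inr he
        · exact Or.inl ⟨ha, by omega⟩
    · simp [List.nodup_append, hnd]
      exact fun a ha he => hnotin (he ▸ ha)
    · exact PySem.Set.nodup_ofList _
  · -- strictly increasing
    rw [List.pairwise_append]
    refine ⟨lobS_pairwise_lt ws (n : Int), by simp, ?_⟩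
    intro a ha b hb
    simp at hb
    have := mem_lobS ha
    omega

-- main invariant: A's fold state after days 1..n, expressed through B's data
lemma lob_inv (ws : List Int) (n : Nat) :
    (match lobS ws (n : Int) with
     | [] =>
        ((PySem.List.pyRange 1 ((n : Int) + 1) 1).foldl
          (fun (s : Int × Int) d =>
            if ¬ ws.contains d then (s.1 + 1, max s.2 (s.1 + 1)) else (0, s.2)) (0, 0))
          = ((n : Int), (n : Int))
     | w0 :: rest =>
        ((PySem.List.pyRange 1 ((n : Int) + 1) 1).foldl
          (fun (s : Int × Int) d =>
            if ¬ ws.contains d then (s.1 + 1, max s.2 (s.1 + 1)) else (0, s.2)) (0, 0))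
          = ((n : Int) - (lobLoop (w0 - 1, w0) rest).2,
             max (lobLoop (w0 - 1, w0) rest).1 ((n : Int) - (lobLoop (w0 - 1, w0) rest).2))) := by
  induction n with
  | zero =>
      simp only [Nat.cast_zero]
      have hS : lobS ws (0 : Int) = [] := by
        unfold lobS
        have : ws.filter (fun w => 1 ≤ w && w ≤ (0 : Int)) = [] := by
          apply List.filter_eq_nil_iff.2
          intro w _
          simp
          omega
        rw [this]
        rfl
      rw [hS]
      simp [PySem.List.pyRange_one_eq_nil]
  | succ n ih =>
      have hcast : (((n + 1 : Nat)) : Int) = (n : Int) + 1 := by push_cast; ring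
      have hrange : PySem.List.pyRange 1 ((n : Int) + 1 + 1) 1
          = PySem.List.pyRange 1 ((n : Int) + 1) 1 ++ [(n : Int) + 1] := by
        exact PySem.List.pyRange_one_succ_right (by omega)
      by_cases hc : ((n : Int) + 1) ∈ ws
      · rw [hcast, lobS_succ_mem ws n hc, hrange]
        rcases hS : lobS ws (n : Int) with _ | ⟨w0, rest⟩
        · rw [hS] at ih
          simp only [List.nil_append]
          rw [List.foldl_append, ih]
          simp [lobLoop, hc]
        · rw [hS] at ih
          have hw0 : 1 ≤ w0 := (mem_lobS (hS ▸ List.mem_cons_self)).2.1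
          have hfst := lobLoop_fst_ge (w0 - 1, w0) rest
          simp only [List.cons_append]
          rw [List.foldl_append, ih, lobLoop_append]
          simp [hc]
          simp at hfst
          omega
      · rw [hcast, lobS_succ_not_mem ws n hc, hrange]
        rcases hS : lobS ws (n : Int) with _ | ⟨w0, rest⟩
        · rw [hS] at ih
          rw [List.foldl_append, ih]
          simp [hc]
        · rw [hS] at ih
          rw [List.foldl_append, ih]
          simp [hc]
          omega

theorem lob_eq (ws : List Int) (t : Int) :
    longest_off_block_py ws t = longest_off_block_py_alt ws t := by
  have hB : longest_off_block_py_alt ws t =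
      (match lobS ws t with
       | [] => max t 0
       | w0 :: rest => max (lobLoop (w0 - 1, w0) rest).1 (t - (lobLoop (w0 - 1, w0) rest).2)) := by
    unfold longest_off_block_py_alt lobS
    rcases h : PySem.List.sorted (PySem.Set.ofList (ws.filter (fun w => 1 ≤ w && w ≤ t))) (fun x => x) false with _ | ⟨w0, rest⟩ <;> rfl
  rcases le_or_gt t 0 with ht | ht
  · have hS : lobS ws t = [] := by
      unfold lobS
      have : ws.filter (fun w => 1 ≤ w && w ≤ t) = [] := by
        apply List.filter_eq_nil_iff.2
        intro w _
        simp
        omega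
      rw [this]
      rfl
    rw [hB, hS]
    unfold longest_off_block_py
    rw [PySem.List.pyRange_one_eq_nil (by omega)]
    simp
    omega
  · obtain ⟨n, rfl⟩ : ∃ n : Nat, t = (n : Int) := ⟨t.toNat, (Int.toNat_of_nonneg (by omega)).symm⟩
    have := lob_inv ws n
    rw [hB]
    unfold longest_off_block_py
    rcases hS : lobS ws (n : Int) with _ | ⟨w0, rest⟩ <;> rw [hS] at this <;> rw [this] <;> simp

-- ===== VERDICT (by name: the statement is the Claim_ definition above) =====
theorem longest_off_block_py_spec : Claim_equal_longest_off_block_py := by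
  intro ws t _
  unfold Spec_longest_off_block_py
  exact lob_eq ws t
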